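-- pv_equiv track=rewrite | github.com/microsoft/interwhen | examples/TTSwithVerification/verina_specgen.py | parse_benchmark_lean_data
-- ===== SOURCE A (Python) =====
-- def parse_benchmark_lean_data(raw_lean_data: str) -> dict:
--     """Parse a .lean file with !benchmark markers into sections"""
--     lines = raw_lean_data.strip().splitlines()
--
--     lean_data = {
--         "task_imports": "",
--         "solution_imports": "",
--         "task_aux": "",
--         "solution_aux": "",
--         "code_aux": "",
--         "precond_aux": "",
--         "postcond_aux": "",
--         "proof_aux": "",
--         "code": "",
--         "precond": "True",
--         "postcond": "",
--         "proof": "sorry",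
--     }
--
--     current_section = None
--     current_content = []
--     current_args = {}
--
--     for line in lines:
--         if "-- !benchmark" in line:
--             marker_part = line.split("-- !benchmark", 1)[1].strip()
--
--             if marker_part.startswith("@start"):
--                 if current_section is not None:
--                     content = "\n".join(current_content).strip()
--                     if current_section == "import":
--                         import_type = current_args.get("type", "task")
--                         if import_type == "task":
--                             lean_data["task_imports"] += content + "\n"
--                         elif import_type == "solution":
--                             lean_data["solution_imports"] += content + "\n"
--                     elif current_section in lean_data:
--                         lean_data[current_section] = content
--
--                 parts = marker_part.split("@start", 1)[1].strip().split(None, 1)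
--                 current_section = parts[0].strip()
--                 current_args = {}
--                 current_content = []
--
--                 if len(parts) > 1:
--                     for arg in parts[1].strip().split():
--                         if "=" in arg:
--                             key, value = arg.split("=", 1)
--                             current_args[key] = value
--
--             elif marker_part.startswith("@end"):
--                 if current_section is not None:
--                     content = "\n".join(current_content).strip()
--                     if current_section == "import":
--                         import_type = current_args.get("type", "task")
--                         if import_type == "task":
--                             lean_data["task_imports"] += content + "\n"
--                         elif import_type == "solution":
--                             lean_data["solution_imports"] += content + "\n"
--                     elif current_section in lean_data:
--                         lean_data[current_section] = content
--                 current_section = None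
--                 current_content = []
--                 current_args = {}
--         else:
--             if current_section is not None:
--                 current_content.append(line)
--
--     return lean_data
-- ===== SOURCE B (Python) =====
-- def _records(raw_lean_data):
--     """First pass: the ordered list of flushed sections as (name, import_type, text)."""
--     recs = []
--     open_name = None
--     open_ty = "task"
--     content = []
--     for line in raw_lean_data.strip().splitlines():
--         if "-- !benchmark" in line:
--             marker = line.split("-- !benchmark", 1)[1].strip()
--             if marker.startswith("@start"):
--                 if open_name is not None:
--                     recs.append((open_name, open_ty, "\n".join(content).strip()))
--                 tokens = marker.split("@start", 1)[1].strip().split(None, 1)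
--                 open_name = tokens[0].strip()
--                 open_ty = "task"
--                 content = []
--                 if len(tokens) > 1:
--                     for tok in tokens[1].strip().split():
--                         if "=" in tok:
--                             key, value = tok.split("=", 1)
--                             if key == "type":
--                                 open_ty = value
--             elif marker.startswith("@end"):
--                 if open_name is not None:
--                     recs.append((open_name, open_ty, "\n".join(content).strip()))
--                 open_name = None
--                 content = []
--         elif open_name is not None:
--             content.append(line)
--     return recs
--
--
-- def _accum(recs, field, ty):
--     """Import-accumulating field: direct sections reset it, matching imports append."""
--     acc = ""
--     for name, t, text in recs:
--         if name == field:
--             acc = text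
--         elif name == "import" and t == ty:
--             acc += text + "\n"
--     return acc
--
--
-- def _last(recs, field, default):
--     """Plain field: text of the last section named `field`, else the default."""
--     acc = default
--     for name, _, text in recs:
--         if name == field:
--             acc = text
--     return acc
--
--
-- def parse_benchmark_lean_data(raw_lean_data: str) -> dict:
--     recs = _records(raw_lean_data)
--     return {
--         "task_imports": _accum(recs, "task_imports", "task"),
--         "solution_imports": _accum(recs, "solution_imports", "solution"),
--         "task_aux": _last(recs, "task_aux", ""),
--         "solution_aux": _last(recs, "solution_aux", ""),
--         "code_aux": _last(recs, "code_aux", ""),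
--         "precond_aux": _last(recs, "precond_aux", ""),
--         "postcond_aux": _last(recs, "postcond_aux", ""),
--         "proof_aux": _last(recs, "proof_aux", ""),
--         "code": _last(recs, "code", ""),
--         "precond": _last(recs, "precond", "True"),
--         "postcond": _last(recs, "postcond", ""),
--         "proof": _last(recs, "proof", "sorry"),
--     }
-- ===== Notes on version B (the rewrite author's own statement) =====
-- stated objective: alternative
-- what changed: A is a single stateful pass that flushes each section directly into a mutable defaults dict; B first collects the ordered list of flushed section records (name, import-type, text) and then computes each of the 12 output fields independently from that list (imports fields by reset-then-accumulate, plain fields by last-match-or-default).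
import Mathlib
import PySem

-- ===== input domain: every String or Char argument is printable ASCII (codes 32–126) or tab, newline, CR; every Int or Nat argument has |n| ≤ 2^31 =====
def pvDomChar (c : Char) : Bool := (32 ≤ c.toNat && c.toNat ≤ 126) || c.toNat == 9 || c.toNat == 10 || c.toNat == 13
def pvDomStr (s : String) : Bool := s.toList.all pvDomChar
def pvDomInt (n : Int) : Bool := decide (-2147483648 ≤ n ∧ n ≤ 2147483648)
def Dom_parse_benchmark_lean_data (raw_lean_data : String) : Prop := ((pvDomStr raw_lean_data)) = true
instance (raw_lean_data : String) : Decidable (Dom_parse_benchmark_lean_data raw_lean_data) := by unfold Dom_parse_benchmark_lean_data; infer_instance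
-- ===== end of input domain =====

-- B replaces A's single stateful pass mutating a defaults dict by a two-phase algorithm: collect the
-- flushed section records once, then compute each of the 12 output fields independently from that list
-- (objective: alternative decomposition, same asymptotic cost).

-- ===== PORT A =====
-- flush of the currently open section into the dict (the code A duplicates at @start and @end)
def pvFlushA (d : PySem.Dict String String) (cs : Option String) (cc : List String)
    (ca : PySem.Dict String String) : PySem.Dict String String :=
  match cs with
  | none => d
  | some sec =>
    let content := PySem.Str.strip (PySem.Str.join "\n" cc)
    if sec == "import" then
      let ity := ca.getD "type" "task"
      if ity == "task" then d.insert "task_imports" (d.getD "task_imports" "" ++ (content ++ "\n"))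
      else if ity == "solution" then d.insert "solution_imports" (d.getD "solution_imports" "" ++ (content ++ "\n"))
      else d
    else if d.contains sec then d.insert sec content
    else d

def pvInitDictA : PySem.Dict String String :=
  PySem.Dict.mk [("task_imports", ""), ("solution_imports", ""), ("task_aux", ""), ("solution_aux", ""),
    ("code_aux", ""), ("precond_aux", ""), ("postcond_aux", ""), ("proof_aux", ""),
    ("code", ""), ("precond", "True"), ("postcond", ""), ("proof", "sorry")]

-- parse of the "key=value" arguments after the section name (A keeps them in a dict)
def pvParseArgsA (parts : List String) : PySem.Dict String String :=
  if parts.length > 1 then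
    (PySem.Str.split₀ (PySem.Str.strip (parts.getD 1 ""))).foldl (fun a arg =>
      if PySem.Str.isIn "=" arg then
        a.insert (((PySem.Str.splitMax? arg "=" 1).getD []).getD 0 "")
                 (((PySem.Str.splitMax? arg "=" 1).getD []).getD 1 "")
      else a) PySem.Dict.empty
  else PySem.Dict.empty

def pvStepA (st : PySem.Dict String String × Option String × List String × PySem.Dict String String)
    (line : String) : PySem.Dict String String × Option String × List String × PySem.Dict String String :=
  let (d, cs, cc, ca) := st
  if PySem.Str.isIn "-- !benchmark" line then
    let marker := PySem.Str.strip (((PySem.Str.splitMax? line "-- !benchmark" 1).getD []).getD 1 "")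
    if PySem.Str.startswith marker "@start" then
      let d' := pvFlushA d cs cc ca
      let parts := PySem.Str.split₀Max (PySem.Str.strip (((PySem.Str.splitMax? marker "@start" 1).getD []).getD 1 "")) 1
      -- Python raises IndexError on parts[0] when parts = []; Pre_ excludes those inputs
      let sec := PySem.Str.strip (parts.getD 0 "")
      (d', some sec, [], pvParseArgsA parts)
    else if PySem.Str.startswith marker "@end" then
      (pvFlushA d cs cc ca, none, [], PySem.Dict.empty)
    else (d, cs, cc, ca)
  else
    if cs.isSome then (d, cs, cc ++ [line], ca) else (d, cs, cc, ca)

def parse_benchmark_lean_data (raw_lean_data : String) : List (String × String) :=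
  let lines := PySem.Str.splitlines (PySem.Str.strip raw_lean_data)
  ((lines.foldl pvStepA (pvInitDictA, none, [], PySem.Dict.empty)).1).items

-- ===== PORT B =====
-- first pass: fold a line into the (records, open name, open import-type, open content) state
-- scan of the argument tokens for the last "type=..." value (B keeps only that)
def pvParseTyB (tokens : List String) : String :=
  if tokens.length > 1 then
    (PySem.Str.split₀ (PySem.Str.strip (tokens.getD 1 ""))).foldl (fun t tok =>
      if PySem.Str.isIn "=" tok then
        if ((PySem.Str.splitMax? tok "=" 1).getD []).getD 0 "" == "type" then
          ((PySem.Str.splitMax? tok "=" 1).getD []).getD 1 ""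
        else t
      else t) "task"
  else "task"

-- append the currently open record (if any) to the collected list
def pvEmitB (recs : List (String × String × String)) (oname : Option String) (oty : String)
    (content : List String) : List (String × String × String) :=
  match oname with
  | some n => recs ++ [(n, oty, PySem.Str.strip (PySem.Str.join "\n" content))]
  | none => recs

def pvStepB (st : List (String × String × String) × Option String × String × List String)
    (line : String) : List (String × String × String) × Option String × String × List String :=
  let (recs, oname, oty, content) := st
  if PySem.Str.isIn "-- !benchmark" line then
    let marker := PySem.Str.strip (((PySem.Str.splitMax? line "-- !benchmark" 1).getD []).getD 1 "")
    if PySem.Str.startswith marker "@start" then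
      let recs' := pvEmitB recs oname oty content
      let tokens := PySem.Str.split₀Max (PySem.Str.strip (((PySem.Str.splitMax? marker "@start" 1).getD []).getD 1 "")) 1
      -- Python raises IndexError on tokens[0] when tokens = []; Pre_ excludes those inputs
      let name := PySem.Str.strip (tokens.getD 0 "")
      (recs', some name, pvParseTyB tokens, [])
    else if PySem.Str.startswith marker "@end" then
      (pvEmitB recs oname oty content, none, oty, [])
    else (recs, oname, oty, content)
  else
    match oname with
    | some _ => (recs, oname, oty, content ++ [line])
    | none => (recs, oname, oty, content)

def pvRecordsB (raw_lean_data : String) : List (String × String × String) :=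
  (((PySem.Str.splitlines (PySem.Str.strip raw_lean_data)).foldl pvStepB ([], none, "task", []))).1

def pvAccumB (recs : List (String × String × String)) (field ty : String) : String :=
  recs.foldl (fun acc r =>
    if r.1 == field then r.2.2
    else if r.1 == "import" && r.2.1 == ty then acc ++ (r.2.2 ++ "\n")
    else acc) ""

def pvLastB (recs : List (String × String × String)) (field dflt : String) : String :=
  recs.foldl (fun acc r => if r.1 == field then r.2.2 else acc) dflt

def parse_benchmark_lean_data_alt (raw_lean_data : String) : List (String × String) :=
  let recs := pvRecordsB raw_lean_data
  [("task_imports", pvAccumB recs "task_imports" "task"),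
   ("solution_imports", pvAccumB recs "solution_imports" "solution"),
   ("task_aux", pvLastB recs "task_aux" ""),
   ("solution_aux", pvLastB recs "solution_aux" ""),
   ("code_aux", pvLastB recs "code_aux" ""),
   ("precond_aux", pvLastB recs "precond_aux" ""),
   ("postcond_aux", pvLastB recs "postcond_aux" ""),
   ("proof_aux", pvLastB recs "proof_aux" ""),
   ("code", pvLastB recs "code" ""),
   ("precond", pvLastB recs "precond" "True"),
   ("postcond", pvLastB recs "postcond" ""),
   ("proof", pvLastB recs "proof" "sorry")]

-- ===== PRECONDITION & SPEC =====
-- Pre_ excludes exactly the inputs on which Python A raises IndexError: a marker line whose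
-- "@start" is followed by only whitespace (no section name); Python B raises there too.
def pvLineOkPre (line : String) : Bool :=
  if PySem.Str.isIn "-- !benchmark" line then
    let marker := PySem.Str.strip (((PySem.Str.splitMax? line "-- !benchmark" 1).getD []).getD 1 "")
    if PySem.Str.startswith marker "@start" then
      PySem.Str.strip (((PySem.Str.splitMax? marker "@start" 1).getD []).getD 1 "") != ""
    else true
  else true

def Pre_parse_benchmark_lean_data (raw_lean_data : String) : Prop :=
  ((PySem.Str.splitlines (PySem.Str.strip raw_lean_data)).all pvLineOkPre) = true

instance (raw_lean_data : String) : Decidable (Pre_parse_benchmark_lean_data raw_lean_data) := by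
  unfold Pre_parse_benchmark_lean_data; infer_instance

set_option maxRecDepth 40000

def pvWitness_parse_benchmark_lean_data : String :=
  "-- !benchmark @start import type=solution\nimport Mathlib\n-- !benchmark @end"

def Spec_parse_benchmark_lean_data (raw_lean_data : String) (out : List (String × String)) : Prop :=
  out = parse_benchmark_lean_data_alt raw_lean_data
instance (raw_lean_data : String) (out : List (String × String)) : Decidable (Spec_parse_benchmark_lean_data raw_lean_data out) := by
  unfold Spec_parse_benchmark_lean_data; infer_instance

-- ===== CLAIM (what is proved, stated in full; the proofs are below) =====
def Claim_equal_parse_benchmark_lean_data : Prop := ∀ (raw_lean_data : String), Dom_parse_benchmark_lean_data raw_lean_data → Pre_parse_benchmark_lean_data raw_lean_data → Spec_parse_benchmark_lean_data raw_lean_data (parse_benchmark_lean_data raw_lean_data)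

-- ===== LEMMAS AND PROOFS =====

-- proof-side view of the flush: what a flushed record (name, import-type, text) does to the dict
def pvApplyRec (d : PySem.Dict String String) (r : String × String × String) : PySem.Dict String String :=
  if r.1 == "import" then
    if r.2.1 == "task" then d.insert "task_imports" (d.getD "task_imports" "" ++ (r.2.2 ++ "\n"))
    else if r.2.1 == "solution" then d.insert "solution_imports" (d.getD "solution_imports" "" ++ (r.2.2 ++ "\n"))
    else d
  else if d.contains r.1 then d.insert r.1 r.2.2
  else d

-- pvAccumB generalized over the starting accumulator
def pvAccumFrom (recs : List (String × String × String)) (field ty v : String) : String :=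
  recs.foldl (fun acc r =>
    if r.1 == field then r.2.2
    else if r.1 == "import" && r.2.1 == ty then acc ++ (r.2.2 ++ "\n")
    else acc) v

theorem pvFlushA_eq (d : PySem.Dict String String) (cs : Option String) (cc : List String)
    (ca : PySem.Dict String String) :
    pvFlushA d cs cc ca = (match cs with
      | none => d
      | some n => pvApplyRec d (n, ca.getD "type" "task", PySem.Str.strip (PySem.Str.join "\n" cc))) := by
  cases cs <;> rfl

theorem pvTyLemma (toks : List String) (a : PySem.Dict String String) (t0 : String)
    (h : a.getD "type" "task" = t0) :
    (toks.foldl (fun a arg =>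
        if PySem.Str.isIn "=" arg then
          a.insert (((PySem.Str.splitMax? arg "=" 1).getD []).getD 0 "")
                   (((PySem.Str.splitMax? arg "=" 1).getD []).getD 1 "")
        else a) a).getD "type" "task"
    = toks.foldl (fun t tok =>
        if PySem.Str.isIn "=" tok then
          if ((PySem.Str.splitMax? tok "=" 1).getD []).getD 0 "" == "type" then
            ((PySem.Str.splitMax? tok "=" 1).getD []).getD 1 ""
          else t
        else t) t0 := by
  induction toks generalizing a t0 with
  | nil => simpa using h
  | cons tok rest ih =>
    simp only [List.foldl_cons]
    by_cases hin : PySem.Str.isIn "=" tok = true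
    · simp only [hin, if_true]
      by_cases hk : ((PySem.Str.splitMax? tok "=" 1).getD []).getD 0 "" = "type"
      · refine ih _ _ ?_
        simp only [List.getD] at hk
        simp [PySem.Dict.getD_insert, hk]
      · refine ih _ _ ?_
        simp only [List.getD] at hk
        simp [PySem.Dict.getD_insert, hk, Ne.symm hk, h]
    · simp only [Bool.not_eq_true] at hin
      simp only [hin, Bool.false_eq_true, if_false]
      exact ih _ _ h

-- the type argument of the open section, read back from A's args dict
theorem pvTyIf (parts : List String) :
    (pvParseArgsA parts).getD "type" "task" = pvParseTyB parts := by
  unfold pvParseArgsA pvParseTyB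
  split_ifs
  · exact pvTyLemma _ PySem.Dict.empty "task" rfl
  · rfl

-- folding the emitted record performs exactly A's flush
theorem pvFlush_foldl (d : PySem.Dict String String) (cs : Option String) (cc : List String)
    (ca : PySem.Dict String String) (oty : String)
    (h : ∀ n, cs = some n → ca.getD "type" "task" = oty) :
    List.foldl pvApplyRec d (pvEmitB [] cs oty cc) = pvFlushA d cs cc ca := by
  rw [pvFlushA_eq]
  cases cs with
  | none => rfl
  | some n => simp [pvEmitB, h n rfl]

-- the collector's record list is accumulated by appending
theorem pvStepB_recs_append (lines : List String) (recs : List (String × String × String))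
    (oname : Option String) (oty : String) (content : List String) :
    (lines.foldl pvStepB (recs, oname, oty, content)).1
      = recs ++ (lines.foldl pvStepB ([], oname, oty, content)).1 := by
  induction lines generalizing recs oname oty content with
  | nil => simp
  | cons line rest ih =>
    simp only [List.foldl_cons]
    have hstep : ∀ rs, (pvStepB (rs, oname, oty, content) line).1 = rs ++ (pvStepB ([], oname, oty, content) line).1 ∧
        (pvStepB (rs, oname, oty, content) line).2 = (pvStepB ([], oname, oty, content) line).2 := by
      intro rs
      simp only [pvStepB, pvEmitB]
      cases oname <;> split_ifs <;> simp
    obtain ⟨h1, h2⟩ := hstep recs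
    obtain ⟨h1', h2'⟩ := hstep []
    rcases e : pvStepB (recs, oname, oty, content) line with ⟨r1, o1, t1, c1⟩
    rcases e' : pvStepB (([] : List (String × String × String)), oname, oty, content) line with ⟨r0, o0, t0, c0⟩
    rw [e, e'] at h1 h2
    simp at h1 h2
    rw [ih, h2.1, h2.2.1, h2.2.2, ih r0, h1]
    simp

-- main invariant: A's fold equals the records fold applied to the dict
set_option maxHeartbeats 2000000 in
theorem pvMain (lines : List String) (d : PySem.Dict String String) (cs : Option String)
    (cc : List String) (ca : PySem.Dict String String) (oty : String)
    (h : ∀ n, cs = some n → ca.getD "type" "task" = oty) :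
    (lines.foldl pvStepA (d, cs, cc, ca)).1
      = ((lines.foldl pvStepB ([], cs, oty, cc)).1).foldl pvApplyRec d := by
  induction lines generalizing d cs cc ca oty with
  | nil => simp
  | cons line rest ih =>
    simp only [List.foldl_cons]
    by_cases hmark : PySem.Str.isIn "-- !benchmark" line = true
    · by_cases hstart : PySem.Str.startswith (PySem.Str.strip (((PySem.Str.splitMax? line "-- !benchmark" 1).getD []).getD 1 "")) "@start" = true
      · -- @start: both flush and open a new section
        simp only [pvStepA, pvStepB, hmark, hstart, if_true]
        rw [pvStepB_recs_append, List.foldl_append, pvFlush_foldl d cs cc ca oty h]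
        exact ih _ _ _ _ _ (fun n _ => pvTyIf _)
      · by_cases hend : PySem.Str.startswith (PySem.Str.strip (((PySem.Str.splitMax? line "-- !benchmark" 1).getD []).getD 1 "")) "@end" = true
        · -- @end: both flush and close
          simp only [pvStepA, pvStepB, hmark, hstart, hend, Bool.false_eq_true, if_false, if_true]
          rw [pvStepB_recs_append, List.foldl_append, pvFlush_foldl d cs cc ca oty h]
          exact ih _ _ _ _ _ (fun n hn => by cases hn)
        · -- other marker: ignored by both
          simp only [pvStepA, pvStepB, hmark, hstart, hend, Bool.false_eq_true, if_false, if_true]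
          exact ih _ _ _ _ _ h
    · -- plain line: appended to the open content by both
      simp only [Bool.not_eq_true] at hmark
      simp only [pvStepA, pvStepB, hmark, Bool.false_eq_true, if_false]
      cases cs with
      | none => simpa using ih d none cc ca oty (by simp)
      | some n => simpa using ih d (some n) (cc ++ [line]) ca oty (by intro m hm; cases hm; exact h n rfl)

-- one record's effect on the 12-field dict, expressed field by field
theorem pvStepRec (n t x v1 v2 v3 v4 v5 v6 v7 v8 v9 v10 v11 v12 : String) :
    pvApplyRec (PySem.Dict.mk [("task_imports", v1), ("solution_imports", v2), ("task_aux", v3),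
      ("solution_aux", v4), ("code_aux", v5), ("precond_aux", v6), ("postcond_aux", v7),
      ("proof_aux", v8), ("code", v9), ("precond", v10), ("postcond", v11), ("proof", v12)]) (n, t, x)
    = PySem.Dict.mk [
        ("task_imports", if n == "task_imports" then x else if n == "import" && t == "task" then v1 ++ (x ++ "\n") else v1),
        ("solution_imports", if n == "solution_imports" then x else if n == "import" && t == "solution" then v2 ++ (x ++ "\n") else v2),
        ("task_aux", if n == "task_aux" then x else v3),
        ("solution_aux", if n == "solution_aux" then x else v4),
        ("code_aux", if n == "code_aux" then x else v5),
        ("precond_aux", if n == "precond_aux" then x else v6),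
        ("postcond_aux", if n == "postcond_aux" then x else v7),
        ("proof_aux", if n == "proof_aux" then x else v8),
        ("code", if n == "code" then x else v9),
        ("precond", if n == "precond" then x else v10),
        ("postcond", if n == "postcond" then x else v11),
        ("proof", if n == "proof" then x else v12)] := by
  by_cases h0 : n = "import"
  · subst h0
    by_cases ht : t = "task"
    · subst ht; simp [pvApplyRec, PySem.Dict.insert, PySem.Dict.contains, PySem.Dict.getD, PySem.Dict.get?]
    · by_cases hs : t = "solution"
      · subst hs; simp [pvApplyRec, PySem.Dict.insert, PySem.Dict.contains, PySem.Dict.getD, PySem.Dict.get?]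
      · simp [pvApplyRec, PySem.Dict.insert, PySem.Dict.contains, PySem.Dict.getD, PySem.Dict.get?, ht, hs]
  · by_cases h1 : n = "task_imports"
    · subst h1; simp [pvApplyRec, PySem.Dict.insert, PySem.Dict.contains, PySem.Dict.getD, PySem.Dict.get?]
    · by_cases h2 : n = "solution_imports"
      · subst h2; simp [pvApplyRec, PySem.Dict.insert, PySem.Dict.contains, PySem.Dict.getD, PySem.Dict.get?]
      · by_cases h3 : n = "task_aux"
        · subst h3; simp [pvApplyRec, PySem.Dict.insert, PySem.Dict.contains, PySem.Dict.getD, PySem.Dict.get?]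
        · by_cases h4 : n = "solution_aux"
          · subst h4; simp [pvApplyRec, PySem.Dict.insert, PySem.Dict.contains, PySem.Dict.getD, PySem.Dict.get?]
          · by_cases h5 : n = "code_aux"
            · subst h5; simp [pvApplyRec, PySem.Dict.insert, PySem.Dict.contains, PySem.Dict.getD, PySem.Dict.get?]
            · by_cases h6 : n = "precond_aux"
              · subst h6; simp [pvApplyRec, PySem.Dict.insert, PySem.Dict.contains, PySem.Dict.getD, PySem.Dict.get?]
              · by_cases h7 : n = "postcond_aux"
                · subst h7; simp [pvApplyRec, PySem.Dict.insert, PySem.Dict.contains, PySem.Dict.getD, PySem.Dict.get?]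
                · by_cases h8 : n = "proof_aux"
                  · subst h8; simp [pvApplyRec, PySem.Dict.insert, PySem.Dict.contains, PySem.Dict.getD, PySem.Dict.get?]
                  · by_cases h9 : n = "code"
                    · subst h9; simp [pvApplyRec, PySem.Dict.insert, PySem.Dict.contains, PySem.Dict.getD, PySem.Dict.get?]
                    · by_cases h10 : n = "precond"
                      · subst h10; simp [pvApplyRec, PySem.Dict.insert, PySem.Dict.contains, PySem.Dict.getD, PySem.Dict.get?]
                      · by_cases h11 : n = "postcond"
                        · subst h11; simp [pvApplyRec, PySem.Dict.insert, PySem.Dict.contains, PySem.Dict.getD, PySem.Dict.get?]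
                        · by_cases h12 : n = "proof"
                          · subst h12; simp [pvApplyRec, PySem.Dict.insert, PySem.Dict.contains, PySem.Dict.getD, PySem.Dict.get?]
                          · simp [pvApplyRec, PySem.Dict.insert, PySem.Dict.contains, PySem.Dict.getD, PySem.Dict.get?,
                              h0, h1, h2, h3, h4, h5, h6, h7, h8, h9, h10, h11, h12,
                              Ne.symm h0, Ne.symm h1, Ne.symm h2, Ne.symm h3, Ne.symm h4, Ne.symm h5,
                              Ne.symm h6, Ne.symm h7, Ne.symm h8, Ne.symm h9, Ne.symm h10, Ne.symm h11, Ne.symm h12]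

-- folding the records over the 12-field dict computes each field independently
theorem pvFold12 (recs : List (String × String × String)) :
    ∀ v1 v2 v3 v4 v5 v6 v7 v8 v9 v10 v11 v12 : String,
    (recs.foldl pvApplyRec (PySem.Dict.mk [("task_imports", v1), ("solution_imports", v2),
      ("task_aux", v3), ("solution_aux", v4), ("code_aux", v5), ("precond_aux", v6),
      ("postcond_aux", v7), ("proof_aux", v8), ("code", v9), ("precond", v10),
      ("postcond", v11), ("proof", v12)])).items
    = [("task_imports", pvAccumFrom recs "task_imports" "task" v1),
       ("solution_imports", pvAccumFrom recs "solution_imports" "solution" v2),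
       ("task_aux", pvLastB recs "task_aux" v3),
       ("solution_aux", pvLastB recs "solution_aux" v4),
       ("code_aux", pvLastB recs "code_aux" v5),
       ("precond_aux", pvLastB recs "precond_aux" v6),
       ("postcond_aux", pvLastB recs "postcond_aux" v7),
       ("proof_aux", pvLastB recs "proof_aux" v8),
       ("code", pvLastB recs "code" v9),
       ("precond", pvLastB recs "precond" v10),
       ("postcond", pvLastB recs "postcond" v11),
       ("proof", pvLastB recs "proof" v12)] := by
  induction recs with
  | nil => intro v1 v2 v3 v4 v5 v6 v7 v8 v9 v10 v11 v12; rfl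
  | cons r rest ih =>
    intro v1 v2 v3 v4 v5 v6 v7 v8 v9 v10 v11 v12
    rcases r with ⟨n, t, x⟩
    simp only [List.foldl_cons, pvStepRec]
    rw [ih]
    simp only [pvAccumFrom, pvLastB, List.foldl_cons]

-- ===== VERDICT (by name: the statement is the Claim_ definition above) =====
theorem parse_benchmark_lean_data_spec : Claim_equal_parse_benchmark_lean_data := by
  intro raw _ _
  unfold Spec_parse_benchmark_lean_data
  unfold parse_benchmark_lean_data parse_benchmark_lean_data_alt pvRecordsB
  simp only []
  rw [pvMain _ _ _ _ _ "task" (by intro n hn; cases hn)]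
  unfold pvInitDictA
  rw [pvFold12]
  have hacc : ∀ recs field ty, pvAccumB recs field ty = pvAccumFrom recs field ty "" := by
    intro recs field ty; rfl
  rw [hacc, hacc]
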